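-- pv_equiv track=rewrite | github.com/alexandraback/datacollection | solutions_1480487_1/Python/13k/a.py | weightedSort
-- ===== SOURCE A (Python) =====
-- def weightedSort(data, weights):
--     def my_key(item):
--         tmp = [item[i] for i in weights]
--         return tmp
--     data.sort(key = my_key,reverse = True)
--     return data
--     data.sort(key = my_key,reverse = True)
--     return data
-- ===== SOURCE B (Python) =====
-- def weightedSort(data, weights):
--     # Explicit stable insertion sort: insert each item (with its cached
--     # composite key) before the first kept item whose key is strictly smaller,
--     # yielding the descending lexicographic order with ties in input order.
--     res = []  # list of (key, item), descending by key, ties in input order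
--     for item in data:
--         k = [item[i] for i in weights]
--         j = 0
--         while j < len(res) and res[j][0] >= k:
--             j += 1
--         res.insert(j, (k, item))
--     data[:] = [it for _, it in res]
--     return data
-- ===== Notes on version B (the rewrite author's own statement) =====
-- stated objective: alternative
-- what changed: Replaces the single library sort by a composite list-valued key with a hand-written stable insertion sort that caches each item's key and inserts it before the first kept item with a strictly smaller key.
import Mathlib
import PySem

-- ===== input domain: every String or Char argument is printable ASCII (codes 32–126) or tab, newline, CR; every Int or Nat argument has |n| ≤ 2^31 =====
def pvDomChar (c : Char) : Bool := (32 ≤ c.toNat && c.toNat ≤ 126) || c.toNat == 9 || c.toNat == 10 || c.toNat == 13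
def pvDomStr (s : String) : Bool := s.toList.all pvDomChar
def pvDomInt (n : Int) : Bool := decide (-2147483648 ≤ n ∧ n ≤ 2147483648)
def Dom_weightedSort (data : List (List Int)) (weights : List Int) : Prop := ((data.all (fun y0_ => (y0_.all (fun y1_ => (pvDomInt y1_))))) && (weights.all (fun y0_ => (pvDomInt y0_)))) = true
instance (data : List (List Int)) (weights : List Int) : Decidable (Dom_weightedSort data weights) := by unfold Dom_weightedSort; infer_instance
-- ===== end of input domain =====

-- B replaces A's single composite-key library sort by a hand-written stable
-- insertion sort with cached keys (objective: alternative decomposition).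
-- Both A and B update `data` in place in Python; the theorems below are about
-- the returned value.

-- ===== PORT A =====
-- A: one stable descending sort by the list-valued key [item[i] for i in weights].
def weightedSort (data : List (List Int)) (weights : List Int) : List (List Int) :=
  PySem.List.sorted data (fun item => weights.map (fun i => PySem.List.pyGetD item i 0)) true

-- ===== PORT B =====
-- Python list `>=` comparison on int lists, lexicographic (exact on ints).
def pyListGe : List Int → List Int → Bool
  | [], [] => true
  | [], _ :: _ => false
  | _ :: _, [] => true
  | a :: as, b :: bs => if a > b then true else if a < b then false else pyListGe as bs

-- the `while j < len(res) and res[j][0] >= k: j += 1; res.insert(j, (k, item))` step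
def wsInsert (k : List Int) (item : List Int) :
    List (List Int × List Int) → List (List Int × List Int)
  | [] => [(k, item)]
  | (k', it') :: rest =>
    if pyListGe k' k then (k', it') :: wsInsert k item rest
    else (k, item) :: (k', it') :: rest

def weightedSort_alt (data : List (List Int)) (weights : List Int) : List (List Int) :=
  (data.foldl
    (fun res item => wsInsert (weights.map (fun i => PySem.List.pyGetD item i 0)) item res)
    []).map Prod.snd

-- ===== PRECONDITION & SPEC =====
-- Pre_ excludes exactly the inputs where Python raises IndexError: some row is
-- too short for some index in weights (both A and B raise there).
def Pre_weightedSort (data : List (List Int)) (weights : List Int) : Prop :=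
  ∀ row ∈ data, ∀ i ∈ weights, PySem.Raise.InRange row.length i
instance (data : List (List Int)) (weights : List Int) : Decidable (Pre_weightedSort data weights) := by unfold Pre_weightedSort; infer_instance

def pvWitness_weightedSort : List (List Int) × List Int := ([[1, 2], [3, 4], [1, 4]], [1, 0])

def Spec_weightedSort (data : List (List Int)) (weights : List Int) (out : List (List Int)) : Prop := out = weightedSort_alt data weights
instance (data : List (List Int)) (weights : List Int) (out : List (List Int)) : Decidable (Spec_weightedSort data weights out) := by unfold Spec_weightedSort; infer_instance

-- ===== CLAIM (what is proved, stated in full; the proofs are below) =====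
def Claim_equal_weightedSort : Prop := ∀ (data : List (List Int)) (weights : List Int), Dom_weightedSort data weights → Pre_weightedSort data weights → Spec_weightedSort data weights (weightedSort data weights)

-- ===== LEMMAS AND PROOFS =====

-- Python's `>=` on int lists is the negation of the lexicographic `<`.
theorem pyListGe_eq_not_lt (a b : List Int) : pyListGe a b = !decide (a < b) := by
  induction a generalizing b with
  | nil =>
    cases b with
    | nil => decide
    | cons y ys => simp [pyListGe, List.nil_lt_cons]
  | cons x xs ih =>
    cases b with
    | nil => simp [pyListGe, List.not_lt_nil]
    | cons y ys =>
      simp only [pyListGe, List.cons_lt_cons_iff, ih]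
      by_cases h1 : y < x
      · simp [h1, show ¬ x < y by omega, show x ≠ y by omega]
      · by_cases h2 : x < y
        · simp [h1, h2]
        · simp [show x = y by omega]

-- wsInsert with key k is PySem's insertBy with predicate "key of kept < k", on snd.
theorem wsInsert_map_snd (key : List Int → List Int) (x : List Int)
    (res : List (List Int × List Int)) (h : ∀ p ∈ res, p.1 = key p.2) :
    (wsInsert (key x) x res).map Prod.snd
      = PySem.List.insertBy (fun a b => decide (key b < key a)) x (res.map Prod.snd) := by
  induction res with
  | nil => rfl
  | cons p rest ih =>
    obtain ⟨k', it'⟩ := p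
    have hk : k' = key it' := h (k', it') List.mem_cons_self
    simp only [wsInsert, List.map_cons, PySem.List.insertBy, hk,
      pyListGe_eq_not_lt]
    cases hlt : decide (key it' < key x) with
    | true =>
      simp only [Bool.not_true, Bool.false_eq_true, if_false, if_true, List.map_cons]
    | false =>
      simp only [Bool.not_false, if_true, Bool.false_eq_true, if_false,
        List.cons.injEq, true_and, List.map_cons]
      exact ih (fun q hq => h q (List.mem_cons_of_mem _ hq))

-- wsInsert preserves the "fst is the key of snd" invariant.
theorem wsInsert_inv (key : List Int → List Int) (x : List Int)
    (res : List (List Int × List Int)) (h : ∀ p ∈ res, p.1 = key p.2) :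
    ∀ p ∈ wsInsert (key x) x res, p.1 = key p.2 := by
  induction res with
  | nil => intro p hp; simp only [wsInsert, List.mem_singleton] at hp; subst hp; rfl
  | cons q rest ih =>
    obtain ⟨k', it'⟩ := q
    intro p hp
    simp only [wsInsert] at hp
    split at hp
    · rcases List.mem_cons.mp hp with h1 | h1
      · subst h1; exact h (k', it') List.mem_cons_self
      · exact ih (fun r hr => h r (List.mem_cons_of_mem _ hr)) p h1
    · rcases List.mem_cons.mp hp with h1 | h1
      · subst h1; rfl
      · exact h p h1

-- The fold of wsInsert computes, under map snd, the fold of insertBy.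
theorem foldl_wsInsert_map_snd (key : List Int → List Int) (data : List (List Int))
    (res : List (List Int × List Int)) (h : ∀ p ∈ res, p.1 = key p.2) :
    (data.foldl (fun res item => wsInsert (key item) item res) res).map Prod.snd
      = data.foldl (fun acc x => PySem.List.insertBy (fun a b => decide (key b < key a)) x acc)
          (res.map Prod.snd) := by
  induction data generalizing res with
  | nil => rfl
  | cons x rest ih =>
    simp only [List.foldl_cons]
    rw [ih _ (wsInsert_inv key x res h), wsInsert_map_snd key x res h]

theorem weightedSort_eq_alt (data : List (List Int)) (weights : List Int) :
    weightedSort data weights = weightedSort_alt data weights := by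
  unfold weightedSort weightedSort_alt
  rw [PySem.List.sorted_rev_eq_foldl_insertBy,
    foldl_wsInsert_map_snd (fun item => weights.map (fun i => PySem.List.pyGetD item i 0)) data []
      (by intro p hp; simp at hp)]
  rfl

-- ===== VERDICT (by name: the statement is the Claim_ definition above) =====
theorem weightedSort_spec : Claim_equal_weightedSort := by
  intro data weights _ _
  unfold Spec_weightedSort
  exact weightedSort_eq_alt data weights
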